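-- pv_equiv track=rewrite | github.com/PennLINC/cros-map | analysis/PET_MR_ML/ML_launcher_clf.py | build_namestring
-- ===== SOURCE A (Python) =====
-- from itertools import product
--
-- def build_namestring(options):
--     iterations = list(product(*options))
--     out_strings = []
--     for it in iterations:
--         string = ''
--         for i,item in enumerate(it):
--             if i == (len(it)-1):
--                 string+=item
--             else:
--                 string+='%s_'%item
--         out_strings.append(string)
--
--     return out_strings
-- ===== SOURCE B (Python) =====
-- def build_namestring(options):
--     def go(acc, rest):
--         if not rest:
--             return acc
--         opts = rest[0]
--         if len(rest) == 1:
--             return [p + item for p in acc for item in opts]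
--         return go([p + '%s_' % item for p in acc for item in opts], rest[1:])
--     return go([''], options)
-- ===== Notes on version B (the rewrite author's own statement) =====
-- stated objective: alternative
-- what changed: Replaces itertools.product plus a per-tuple enumerate/join pass with a single recursive fold over the option lists that extends partial prefix strings (underscore-suffixed for every list but the last), never materialising tuples.
import Mathlib
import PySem

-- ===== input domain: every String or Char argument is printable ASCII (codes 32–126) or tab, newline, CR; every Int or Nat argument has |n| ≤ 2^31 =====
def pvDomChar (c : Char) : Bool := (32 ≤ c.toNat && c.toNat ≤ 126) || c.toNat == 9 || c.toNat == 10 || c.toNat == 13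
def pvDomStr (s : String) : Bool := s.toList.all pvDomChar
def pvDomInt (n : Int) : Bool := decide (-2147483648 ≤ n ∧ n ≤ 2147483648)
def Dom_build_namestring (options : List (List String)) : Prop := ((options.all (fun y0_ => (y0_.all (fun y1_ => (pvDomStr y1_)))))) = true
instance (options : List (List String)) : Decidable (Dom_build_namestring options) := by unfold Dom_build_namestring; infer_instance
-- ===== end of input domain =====

-- B replaces itertools.product + a per-tuple join pass by a single recursive fold that
-- grows partial strings directly (objective: alternative decomposition; same output).

-- ===== PORT A =====
-- itertools.product(*options), tuples in lexicographic order
def pyProd : List (List String) → List (List String)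
  | [] => [[]]
  | l :: ls => l.flatMap (fun x => (pyProd ls).map (fun t => x :: t))

def build_namestring (options : List (List String)) : List String :=
  let iterations := pyProd options
  iterations.foldl (fun out_strings it =>
    out_strings ++ [(PySem.List.enumerate it 0).foldl
      (fun string p =>
        if p.1 = (it.length : Int) - 1 then string ++ p.2 else string ++ p.2 ++ "_") ""]) []

-- ===== PORT B =====
def altGo : List String → List (List String) → List String
  | acc, [] => acc
  | acc, opts :: rest =>
    if rest.isEmpty then acc.flatMap (fun p => opts.map (fun item => p ++ item))
    else altGo (acc.flatMap (fun p => opts.map (fun item => p ++ item ++ "_"))) rest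

def build_namestring_alt (options : List (List String)) : List String :=
  altGo [""] options

-- ===== PRECONDITION & SPEC =====
def Spec_build_namestring (options : List (List String)) (out : List String) : Prop := out = build_namestring_alt options
instance (options : List (List String)) (out : List String) : Decidable (Spec_build_namestring options out) := by unfold Spec_build_namestring; infer_instance

-- ===== CLAIM (what is proved, stated in full; the proofs are below) =====
def Claim_equal_build_namestring : Prop := ∀ (options : List (List String)), Dom_build_namestring options → Spec_build_namestring options (build_namestring options)

-- ===== LEMMAS AND PROOFS =====

/-- The underscore-join A computes per tuple, stated recursively. -/
def joinA : List String → String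
  | [] => ""
  | [x] => x
  | x :: y :: t => x ++ "_" ++ joinA (y :: t)

theorem foldEnum (n : Int) : ∀ (t : List String) (k : Int) (s : String), k + (t.length : Int) = n →
    (PySem.List.enumerate t k).foldl
      (fun string p => if p.1 = n - 1 then string ++ p.2 else string ++ p.2 ++ "_") s
    = s ++ joinA t := by
  intro t
  induction t with
  | nil => intro k s _; simp [PySem.List.enumerate_nil, joinA]
  | cons x rest ih =>
    intro k s hk
    rw [PySem.List.enumerate_cons]
    cases rest with
    | nil =>
      have hk' : k = n - 1 := by simp at hk; omega
      simp [List.foldl, PySem.List.enumerate_nil, joinA, hk']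
    | cons y t' =>
      have hne : k ≠ n - 1 := by simp at hk; omega
      simp only [List.foldl_cons, hne, if_false]
      rw [ih (k + 1) (s ++ x ++ "_") (by simp at hk ⊢; omega)]
      simp [joinA, String.append_assoc]

theorem altGo_eq : ∀ (opts : List (List String)) (acc : List String),
    altGo acc opts = acc.flatMap (fun p => (pyProd opts).map (fun t => p ++ joinA t)) := by
  intro opts
  induction opts with
  | nil => intro acc; simp [altGo, pyProd, joinA]
  | cons o rest ih =>
    intro acc
    cases rest with
    | nil =>
      simp only [altGo, List.isEmpty_nil, if_true, pyProd]
      congr 1; funext p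
      induction o with
      | nil => simp
      | cons a o' iho => simp_all [joinA]
    | cons r rs =>
      conv_lhs => rw [altGo]
      simp only [List.isEmpty_cons, Bool.false_eq_true, if_false]
      rw [ih]
      simp only [pyProd, List.flatMap_assoc, List.map_flatMap, List.flatMap_map]
      congr 1; funext p
      congr 1; funext x
      congr 1; funext a
      simp only [List.map_map]
      apply List.map_congr_left
      intro t _
      simp [Function.comp, joinA, String.append_assoc]

theorem foldl_append_map {α β : Type} (g : α → β) :
    ∀ (l : List α) (init : List β),
    l.foldl (fun out it => out ++ [g it]) init = init ++ l.map g := by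
  intro l
  induction l with
  | nil => intro init; simp
  | cons x xs ih => intro init; simp [List.foldl_cons, ih]

theorem build_namestring_eq_map (options : List (List String)) :
    build_namestring options = (pyProd options).map joinA := by
  unfold build_namestring
  simp only
  rw [foldl_append_map (fun it => (PySem.List.enumerate it 0).foldl
      (fun string p => if p.1 = (it.length : Int) - 1 then string ++ p.2 else string ++ p.2 ++ "_") "")]
  simp only [List.nil_append]
  apply List.map_congr_left
  intro it _
  rw [foldEnum ((it.length : Int)) it 0 "" (by simp)]
  simp

-- ===== VERDICT (by name: the statement is the Claim_ definition above) =====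
theorem build_namestring_spec : Claim_equal_build_namestring := by
  intro options _
  show build_namestring options = build_namestring_alt options
  rw [build_namestring_eq_map, build_namestring_alt, altGo_eq]
  simp
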